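-- pv_equiv track=rewrite | github.com/sakethpodila/SmartIntern | backend/services/resume_parser.py | _extract_summary
-- ===== SOURCE A (Python) =====
-- from typing import Dict, BinaryIO, Optional, List
--
-- def _extract_summary(text: str) -> Optional[str]:
--     # Look for common summary section headers
--     summary_headers = ["summary", "professional summary", "objective"]
--     lines = text.split('\n')
--
--     for i, line in enumerate(lines):
--         if any(header in line.lower() for header in summary_headers):
--             # Return next non-empty line
--             for next_line in lines[i+1:]:
--                 if next_line.strip():
--                     return next_line.strip()
--     return None
-- ===== SOURCE B (Python) =====
-- from typing import Optional
--
-- def _extract_summary(text: str) -> Optional[str]: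
--     summary_headers = ["summary", "professional summary", "objective"]
--     found_header = False
--     for line in text.split('\n'):
--         if found_header:
--             stripped = line.strip()
--             if stripped:
--                 return stripped
--         elif any(header in line.lower() for header in summary_headers):
--             found_header = True
--     return None
-- ===== Notes on version B (the rewrite author's own statement) =====
-- stated objective: simpler
-- what changed: Replaced the nested scan (enumerate + inner loop over a fresh slice lines[i+1:] for every matching header) with one flat state-machine pass over the lines using a boolean found_header flag; no index bookkeeping or slicing.
import Mathlib
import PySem

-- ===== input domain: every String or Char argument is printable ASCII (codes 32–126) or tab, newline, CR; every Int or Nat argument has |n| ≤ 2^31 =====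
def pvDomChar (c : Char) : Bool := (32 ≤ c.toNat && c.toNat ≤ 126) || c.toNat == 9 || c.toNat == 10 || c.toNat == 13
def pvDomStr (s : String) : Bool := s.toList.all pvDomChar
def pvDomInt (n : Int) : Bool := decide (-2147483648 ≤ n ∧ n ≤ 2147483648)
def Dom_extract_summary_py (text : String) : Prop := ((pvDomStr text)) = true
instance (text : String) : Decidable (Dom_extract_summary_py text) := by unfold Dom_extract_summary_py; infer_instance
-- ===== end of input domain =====

-- B replaces A's nested scan (enumerate + inner loop over lines[i+1:]) with one flat
-- flag-driven pass over the lines; objective: simpler.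


-- ===== PORT A =====
def pvHeaders : List String := ["summary", "professional summary", "objective"]

-- any(header in line.lower() for header in summary_headers)
def pvMatchHdr (line : String) : Bool :=
  pvHeaders.any (fun h => PySem.Str.isIn h (PySem.Str.lower line))

-- inner loop: for next_line in lines[i+1:]: if next_line.strip(): return next_line.strip()
def pvInnerA : List String → Option String
  | [] => none
  | l :: r => if PySem.Str.strip l = "" then pvInnerA r else some (PySem.Str.strip l)

-- outer loop: for i, line in enumerate(lines): …
def pvOuterA (lines : List String) : List (Int × String) → Option String
  | [] => none
  | (i, line) :: rest =>
    if pvMatchHdr line then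
      match pvInnerA (PySem.List.slice lines (some (i + 1)) none) with
      | some s => some s
      | none => pvOuterA lines rest
    else pvOuterA lines rest

def extract_summary_py (text : String) : Option String :=
  let lines := (PySem.Str.split? text "\n").getD []   -- sep ≠ "" ⇒ split? is always `some`
  pvOuterA lines (PySem.List.enumerate lines 0)

-- ===== PORT B =====
-- single pass with a found_header flag
def pvLoopB : Bool → List String → Option String
  | _, [] => none
  | true, l :: r =>
    let stripped := PySem.Str.strip l
    if stripped = "" then pvLoopB true r else some stripped
  | false, l :: r => if pvMatchHdr l then pvLoopB true r else pvLoopB false r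

def extract_summary_py_alt (text : String) : Option String :=
  pvLoopB false ((PySem.Str.split? text "\n").getD [])

-- ===== PRECONDITION & SPEC =====
def Spec_extract_summary_py (text : String) (out : Option String) : Prop := out = extract_summary_py_alt text
instance (text : String) (out : Option String) : Decidable (Spec_extract_summary_py text out) := by unfold Spec_extract_summary_py; infer_instance

-- ===== CLAIM (what is proved, stated in full; the proofs are below) =====
def Claim_equal_extract_summary_py : Prop := ∀ (text : String), Dom_extract_summary_py text → Spec_extract_summary_py text (extract_summary_py text)

-- ===== LEMMAS AND PROOFS =====

-- B's found_header=True phase is exactly A's inner loop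
theorem pvLoopB_true_eq_inner (r : List String) : pvLoopB true r = pvInnerA r := by
  induction r with
  | nil => rfl
  | cons l r ih => simp [pvLoopB, pvInnerA, ih]

-- once the inner loop finds nothing, B's loop finds nothing either (in either state)
theorem pvLoopB_none (r : List String) (h : pvInnerA r = none) (b : Bool) :
    pvLoopB b r = none := by
  induction r generalizing b with
  | nil => cases b <;> rfl
  | cons l r ih =>
    simp only [pvInnerA] at h
    by_cases hs : PySem.Str.strip l = ""
    · simp only [hs] at h
      cases b with
      | true => simpa [pvLoopB, hs] using ih h true
      | false =>
        simp only [pvLoopB]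
        by_cases hm : pvMatchHdr l <;> simp [hm, ih h]
    · simp [hs] at h

theorem pvOuterA_eq_loopB (suf : List String) : ∀ (lines : List String) (n : Nat),
    lines.drop n = suf →
    pvOuterA lines (PySem.List.enumerate suf (n : Int)) = pvLoopB false suf := by
  induction suf with
  | nil => intro lines n _; simp [PySem.List.enumerate_nil, pvOuterA, pvLoopB]
  | cons l r ih =>
    intro lines n hdrop
    have hslice : PySem.List.slice lines (some ((n : Int) + 1)) none = r := by
      have : ((n : Int) + 1) = ((n + 1 : Nat) : Int) := by push_cast; ring
      rw [this, PySem.List.slice_from_natCast]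
      have : lines.drop (n + 1) = List.drop 1 (lines.drop n) := by
        rw [List.drop_drop]
      rw [this, hdrop]
      rfl
    rw [PySem.List.enumerate_cons]
    simp only [pvOuterA, pvLoopB, hslice]
    by_cases hm : pvMatchHdr l
    · simp only [hm]
      rw [pvLoopB_true_eq_inner]
      cases hin : pvInnerA r with
      | some s => rfl
      | none =>
        have hdrop' : lines.drop (n + 1) = r := by
          rw [← List.drop_drop, hdrop]; rfl
        have := ih lines (n + 1) (by exact_mod_cast hdrop')
        rw [show ((n : Int) + 1) = ((n + 1 : Nat) : Int) by push_cast; ring, this]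
        exact pvLoopB_none r hin false
    · simp [hm]
      have hdrop' : lines.drop (n + 1) = r := by rw [← List.drop_drop, hdrop]; rfl
      have := ih lines (n + 1) hdrop'
      rw [show ((n : Int) + 1) = ((n + 1 : Nat) : Int) by push_cast; ring]
      exact this

-- ===== VERDICT (by name: the statement is the Claim_ definition above) =====
theorem extract_summary_py_spec : Claim_equal_extract_summary_py := by
  intro text _
  unfold Spec_extract_summary_py extract_summary_py extract_summary_py_alt
  exact pvOuterA_eq_loopB _ ((PySem.Str.split? text "\n").getD []) 0 rfl
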